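-- pv_equiv track=rewrite | github.com/cvat-ai/cvat | cvat/apps/engine/data_manager.py | _get_objects_by_frame
-- ===== SOURCE A (Python) =====
-- def _get_objects_by_frame(objects, start_frame):
--     objects_by_frame = {}
--     for obj in objects:
--         if obj["frame"] >= start_frame:
--             if obj["frame"] in objects_by_frame:
--                 objects_by_frame[obj["frame"]].append(obj)
--             else:
--                 objects_by_frame[obj["frame"]] = [obj]
--
--     return objects_by_frame
-- ===== SOURCE B (Python) =====
-- def _get_objects_by_frame(objects, start_frame):
--     # Two-pass decomposition: first collect the qualifying frames in first-occurrence
--     # order, then gather each frame's objects with a per-frame scan.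
--     frames = []
--     for obj in objects:
--         f = obj["frame"]
--         if f >= start_frame and f not in frames:
--             frames.append(f)
--     return {f: [obj for obj in objects if obj["frame"] == f] for f in frames}
-- ===== Notes on version B (the rewrite author's own statement) =====
-- stated objective: alternative
-- what changed: Replaces A's single-pass hash-bucketing (mutating per-frame lists in a dict) with a two-pass decomposition: collect the distinct qualifying frames in first-occurrence order, then build the result by a per-frame filter over the object list.
import Mathlib
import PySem

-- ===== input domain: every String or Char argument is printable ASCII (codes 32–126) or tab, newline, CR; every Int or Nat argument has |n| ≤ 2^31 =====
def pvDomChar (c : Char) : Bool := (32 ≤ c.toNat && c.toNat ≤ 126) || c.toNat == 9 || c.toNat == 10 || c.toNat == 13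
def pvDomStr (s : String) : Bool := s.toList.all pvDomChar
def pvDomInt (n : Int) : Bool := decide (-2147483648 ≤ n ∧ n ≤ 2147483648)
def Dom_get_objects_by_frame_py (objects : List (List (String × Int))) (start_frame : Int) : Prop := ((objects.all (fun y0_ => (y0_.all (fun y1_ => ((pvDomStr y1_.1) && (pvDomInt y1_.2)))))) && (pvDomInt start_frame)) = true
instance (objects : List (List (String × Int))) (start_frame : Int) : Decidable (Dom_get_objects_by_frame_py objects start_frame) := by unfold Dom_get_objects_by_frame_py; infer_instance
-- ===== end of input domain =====

-- B replaces A's one-pass dict bucketing with a two-pass decomposition (qualifying frames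
-- in first-occurrence order, then a per-frame filter); equal output, no speed claim.

-- obj["frame"]: first-match lookup; Pre_ guarantees the key is present (Python raises KeyError otherwise)
def pvFrame (obj : List (String × Int)) : Int :=
  ((PySem.Dict.mk obj).get? "frame").getD 0

-- ===== PORT A =====
def get_objects_by_frame_py (objects : List (List (String × Int))) (start_frame : Int) : List (Int × List (List (String × Int))) :=
  (objects.foldl (fun d obj =>
      if pvFrame obj ≥ start_frame then
        if d.contains (pvFrame obj) then
          d.insert (pvFrame obj) (d.getD (pvFrame obj) [] ++ [obj])
        else
          d.insert (pvFrame obj) [obj]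
      else d)
    PySem.Dict.empty).items

-- ===== PORT B =====
def get_objects_by_frame_py_alt (objects : List (List (String × Int))) (start_frame : Int) : List (Int × List (List (String × Int))) :=
  let frames := objects.foldl (fun fs obj =>
      if pvFrame obj ≥ start_frame ∧ pvFrame obj ∉ fs then fs ++ [pvFrame obj] else fs)
    ([] : List Int)
  frames.map (fun f => (f, objects.filter (fun obj => pvFrame obj == f)))

-- ===== PRECONDITION & SPEC =====
-- Pre_ excludes exactly the inputs where Python A raises KeyError: an object without the key "frame" (B raises there too).
def Pre_get_objects_by_frame_py (objects : List (List (String × Int))) (start_frame : Int) : Prop :=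
  ∀ obj ∈ objects, obj.any (fun p => p.1 == "frame") = true
instance (objects : List (List (String × Int))) (start_frame : Int) : Decidable (Pre_get_objects_by_frame_py objects start_frame) := by unfold Pre_get_objects_by_frame_py; infer_instance

def pvWitness_get_objects_by_frame_py : (List (List (String × Int))) × Int :=
  ([[("frame", 1), ("id", 7)], [("frame", 0)], [("frame", 1)]], 1)

def Spec_get_objects_by_frame_py (objects : List (List (String × Int))) (start_frame : Int) (out : List (Int × List (List (String × Int)))) : Prop := out = get_objects_by_frame_py_alt objects start_frame
instance (objects : List (List (String × Int))) (start_frame : Int) (out : List (Int × List (List (String × Int)))) : Decidable (Spec_get_objects_by_frame_py objects start_frame out) := by unfold Spec_get_objects_by_frame_py; infer_instance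

-- ===== CLAIM (what is proved, stated in full; the proofs are below) =====
def Claim_equal_get_objects_by_frame_py : Prop := ∀ (objects : List (List (String × Int))) (start_frame : Int), Dom_get_objects_by_frame_py objects start_frame → Pre_get_objects_by_frame_py objects start_frame → Spec_get_objects_by_frame_py objects start_frame (get_objects_by_frame_py objects start_frame)

-- ===== LEMMAS AND PROOFS =====

-- filtering one appended element
lemma pv_filter_append_singleton {α : Type} (p : α → Bool) (l : List α) (x : α) :
    (l ++ [x]).filter p = l.filter p ++ (if p x then [x] else []) := by
  cases hpx : p x <;> simp [List.filter_append, hpx]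

-- the loop invariant: A's dict items mirror B's frame list with per-frame filters over the consumed prefix
lemma pv_main (start_frame : Int) (xs : List (List (String × Int))) :
    ∀ (fs : List Int) (ctx : List (List (String × Int)))
      (d : PySem.Dict Int (List (List (String × Int)))),
      d.items = fs.map (fun f => (f, ctx.filter (fun o => pvFrame o == f))) →
      fs.Nodup →
      (∀ f ∈ fs, start_frame ≤ f) →
      (∀ o ∈ ctx, start_frame ≤ pvFrame o → pvFrame o ∈ fs) →
      (xs.foldl (fun d obj =>
          if pvFrame obj ≥ start_frame then
            if d.contains (pvFrame obj) then
              d.insert (pvFrame obj) (d.getD (pvFrame obj) [] ++ [obj])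
            else
              d.insert (pvFrame obj) [obj]
          else d) d).items =
      (xs.foldl (fun fs obj =>
          if pvFrame obj ≥ start_frame ∧ pvFrame obj ∉ fs then fs ++ [pvFrame obj] else fs) fs).map
        (fun f => (f, (ctx ++ xs).filter (fun o => pvFrame o == f))) := by
  induction xs with
  | nil =>
    intro fs ctx d hitems _ _ _
    simpa using hitems
  | cons o xs ih =>
    intro fs ctx d hitems hnd hge hcov
    have hkeys : d.keys = fs := by
      simp [PySem.Dict.keys, hitems, Function.comp_def]
    have hkeysnd : d.keys.Nodup := by rw [hkeys]; exact hnd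
    by_cases hq : pvFrame o ≥ start_frame
    · by_cases hmem : pvFrame o ∈ fs
      · -- existing bucket: append to it
        have hcon : d.contains (pvFrame o) = true := by
          rw [PySem.Dict.contains_eq_decide_mem_keys, hkeys]; simpa using hmem
        have hitem_mem : (pvFrame o, ctx.filter (fun o' => pvFrame o' == pvFrame o)) ∈ d.items := by
          rw [hitems]; exact List.mem_map_of_mem hmem
        have hgetD : d.getD (pvFrame o) [] = ctx.filter (fun o' => pvFrame o' == pvFrame o) :=
          PySem.Dict.getD_of_mem_items d hitem_mem hkeysnd []
        simp only [List.foldl_cons, hq, if_pos, hcon, hmem, not_true_eq_false, and_false,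
          if_false, ge_iff_le]
        rw [ih fs (ctx ++ [o])
            (d.insert (pvFrame o) (d.getD (pvFrame o) [] ++ [o]))
            ?_ hnd hge ?_]
        · simp [List.append_assoc]
        · -- new items invariant
          rw [PySem.Dict.items_insert_of_contains d _ hcon, hitems, List.map_map]
          apply List.map_congr_left
          intro g hg
          rw [pv_filter_append_singleton]
          by_cases hgf : g = pvFrame o
          · subst hgf
            simp [hgetD]
          · have : (pvFrame o == g) = false := by simp [Ne.symm hgf]
            simp [this, hgf]
        · intro o' ho' _
          rcases List.mem_append.mp ho' with h | h
          · exact hcov o' h (by assumption)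
          · simp at h; subst h; exact hmem
      · -- fresh frame
        have hcon : d.contains (pvFrame o) = false := by
          rw [PySem.Dict.contains_eq_decide_mem_keys, hkeys]; simpa using hmem
        simp only [List.foldl_cons, hq, if_pos, hcon, Bool.false_eq_true, if_false, hmem,
          not_false_eq_true, and_true, ge_iff_le]
        rw [ih (fs ++ [pvFrame o]) (ctx ++ [o]) (d.insert (pvFrame o) [o]) ?_ ?_ ?_ ?_]
        · simp [List.append_assoc]
        · rw [PySem.Dict.items_insert_of_not_contains d _ hcon, hitems]
          have hctxnil : ctx.filter (fun o' => pvFrame o' == pvFrame o) = [] := by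
            apply List.filter_eq_nil_iff.mpr
            intro o' ho' hfo
            have heq : pvFrame o' = pvFrame o := by simpa using hfo
            exact hmem (heq ▸ hcov o' ho' (heq ▸ hq))
          rw [List.map_append]
          congr 1
          · apply List.map_congr_left
            intro g hg
            rw [pv_filter_append_singleton]
            have : (pvFrame o == g) = false := by
              simp; intro h; exact hmem (h ▸ hg)
            simp [this]
          · simp [hctxnil]
        · refine hnd.append (List.nodup_singleton _) ?_
          intro a ha hb
          simp only [List.mem_singleton] at hb
          exact hmem (hb ▸ ha)
        · intro f hf
          rcases List.mem_append.mp hf with h | h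
          · exact hge f h
          · simp at h; subst h; exact hq
        · intro o' ho' hq'
          rcases List.mem_append.mp ho' with h | h
          · exact List.mem_append_left _ (hcov o' h hq')
          · simp at h; subst h; exact List.mem_append_right _ (by simp)
    · -- frame below start_frame: both loops skip
      simp only [List.foldl_cons, hq, if_neg, false_and, ge_iff_le,
        not_false_eq_true]
      rw [ih fs (ctx ++ [o]) d ?_ hnd hge ?_]
      · simp [List.append_assoc]
      · rw [hitems]
        apply List.map_congr_left
        intro g hg
        rw [pv_filter_append_singleton]
        have : (pvFrame o == g) = false := by
          simp; intro h; exact hq (h ▸ hge g hg)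
        simp [this]
      · intro o' ho' hq'
        rcases List.mem_append.mp ho' with h | h
        · exact hcov o' h hq'
        · simp at h; subst h; exact absurd hq' hq

-- ===== VERDICT (by name: the statement is the Claim_ definition above) =====
theorem get_objects_by_frame_py_spec : Claim_equal_get_objects_by_frame_py := by
  intro objects start_frame _ _
  show get_objects_by_frame_py objects start_frame = get_objects_by_frame_py_alt objects start_frame
  unfold get_objects_by_frame_py get_objects_by_frame_py_alt
  have h := pv_main start_frame objects [] [] PySem.Dict.empty (by rfl) (by simp) (by simp) (by simp)
  simpa using h
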